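-- pv_equiv track=rewrite | github.com/maksmondeo/code-kata | codewars.com/038.py | alphanumeric
-- ===== SOURCE A (Python) =====
-- def alphanumeric(password):
--     letter = False
--
--     for i in list(password):
--         if ord(i) in range(65, 91) or ord(i) in range(97, 123):
--             letter = True
--         elif ord(i) in range(48, 58):
--             pass
--         else:
--             return False
--
--     if letter:
--         return True
--     return False
-- ===== SOURCE B (Python) =====
-- def alphanumeric(password):
--     if not all(65 <= ord(c) <= 90 or 97 <= ord(c) <= 122 or 48 <= ord(c) <= 57 for c in password):
--         return False
--     return any(65 <= ord(c) <= 90 or 97 <= ord(c) <= 122 for c in password)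
-- ===== Notes on version B (the rewrite author's own statement) =====
-- stated objective: idiomatic
-- what changed: Replaces the single stateful loop with a boolean flag and mid-loop early return by two declarative short-circuiting passes: all() checks every char is in the allowed ord ranges, then any() checks a letter exists.
import Mathlib
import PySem

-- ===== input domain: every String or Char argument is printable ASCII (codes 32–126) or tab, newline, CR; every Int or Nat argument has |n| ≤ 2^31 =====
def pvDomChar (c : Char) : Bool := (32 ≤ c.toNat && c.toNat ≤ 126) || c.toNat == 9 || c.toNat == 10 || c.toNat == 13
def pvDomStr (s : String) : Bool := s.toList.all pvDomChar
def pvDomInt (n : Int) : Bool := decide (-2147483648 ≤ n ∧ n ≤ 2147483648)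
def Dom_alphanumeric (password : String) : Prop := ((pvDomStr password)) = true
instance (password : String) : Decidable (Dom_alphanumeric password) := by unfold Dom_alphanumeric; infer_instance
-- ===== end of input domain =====

-- B replaces A's stateful loop with early return by two short-circuiting passes (all allowed, then any letter); same values, idiomatic decomposition.
-- ===== PORT A =====
-- loop over list(password), carrying the `letter` flag; `return False` mid-loop = stop with false
def pvIsLetter (c : Char) : Bool := (65 ≤ c.toNat && c.toNat ≤ 90) || (97 ≤ c.toNat && c.toNat ≤ 122)
def pvIsDigit (c : Char) : Bool := 48 ≤ c.toNat && c.toNat ≤ 57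
def alphanumericLoop : List Char → Bool → Bool
  | [], letter => if letter then true else false
  | c :: cs, letter =>
    if pvIsLetter c then alphanumericLoop cs true
    else if pvIsDigit c then alphanumericLoop cs letter
    else false

def alphanumeric (password : String) : Bool :=
  alphanumericLoop password.toList false

-- ===== PORT B =====
def alphanumeric_alt (password : String) : Bool :=
  if ¬ (password.toList.all fun c => pvIsLetter c || pvIsDigit c) then false
  else password.toList.any pvIsLetter

-- ===== PRECONDITION & SPEC =====
def Spec_alphanumeric (password : String) (out : Bool) : Prop := out = alphanumeric_alt password
instance (password : String) (out : Bool) : Decidable (Spec_alphanumeric password out) := by unfold Spec_alphanumeric; infer_instance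

-- ===== CLAIM (what is proved, stated in full; the proofs are below) =====
def Claim_equal_alphanumeric : Prop := ∀ (password : String), Dom_alphanumeric password → Spec_alphanumeric password (alphanumeric password)

-- ===== LEMMAS AND PROOFS =====

-- ===== VERDICT (by name: the statement is the Claim_ definition above) =====
theorem loop_eq (l : List Char) (letter : Bool) :
    alphanumericLoop l letter =
      ((l.all fun c => pvIsLetter c || pvIsDigit c) && (letter || l.any pvIsLetter)) := by
  induction l generalizing letter with
  | nil => cases letter <;> simp [alphanumericLoop]
  | cons c cs ih =>
    by_cases hl : pvIsLetter c = true <;> by_cases hd : pvIsDigit c = true <;>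
      simp [alphanumericLoop, hl, hd, ih]

theorem alphanumeric_spec : Claim_equal_alphanumeric := by
  intro password _
  unfold Spec_alphanumeric alphanumeric alphanumeric_alt
  rw [loop_eq]
  by_cases h : (password.toList.all fun c => pvIsLetter c || pvIsDigit c) = true <;> simp [h]
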